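-- pv_equiv track=rewrite | github.com/Sebastian-Russo/Project-Phoenix-01-Personal-Knowledge-Base | src/ingestion/pdf_ingester.py | _clean_page
-- ===== SOURCE A (Python) =====
-- def _clean_page(text: str, page_num: int) -> str:
--     """
--     Clean common PDF extraction artifacts from a single page.
--
--     Common issues:
--     - Words split across lines with a hyphen: "impor-\ntant" → "important"
--     - Excessive whitespace between characters
--     - Page numbers appearing mid-text
--     - Headers/footers repeating on every page
--     """
--     if not text:
--         return ""
--
--     lines    = text.splitlines()
--     cleaned  = []
--
--     for line in lines:
--         line = line.strip()
--
--         # Skip lines that are just a page number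
--         if line.isdigit():
--             continue
--
--         # Skip very short lines that are likely headers/footers
--         # (less than 3 words and not ending with punctuation)
--         words = line.split()
--         if len(words) <= 2 and not line.endswith((".", "!", "?", ":")):
--             continue
--
--         # Rejoin hyphenated line breaks: "impor-" + "tant" → "important"
--         if cleaned and cleaned[-1].endswith("-"):
--             cleaned[-1] = cleaned[-1][:-1] + line
--         else:
--             cleaned.append(line)
--
--     return "\n".join(cleaned)
-- ===== SOURCE B (Python) =====
-- def _keep(raw):
--     line = raw.strip()
--     if line.isdigit():
--         return None
--     if len(line.split()) <= 2 and not line.endswith((".", "!", "?", ":")):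
--         return None
--     return line
--
--
-- def _clean_page(text: str, page_num: int) -> str:
--     if not text:
--         return ""
--     kept = [ln for ln in map(_keep, text.splitlines()) if ln is not None]
--     out = []
--     cur = None
--     for ln in kept:
--         if cur is None:
--             cur = ln
--         elif cur.endswith("-"):
--             cur = cur[:-1] + ln
--         else:
--             out.append(cur)
--             cur = ln
--     if cur is not None:
--         out.append(cur)
--     return "\n".join(out)
-- ===== Notes on version B (the rewrite author's own statement) =====
-- stated objective: alternative
-- what changed: A's single interleaved loop (filter conditions plus in-place mutation of cleaned[-1] for hyphen merging) is re-decomposed into a filter/normalise comprehension producing the kept lines followed by a separate one-pass merge that carries the segment being assembled in a 'cur' variable instead of mutating the output list's last element.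
import Mathlib
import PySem

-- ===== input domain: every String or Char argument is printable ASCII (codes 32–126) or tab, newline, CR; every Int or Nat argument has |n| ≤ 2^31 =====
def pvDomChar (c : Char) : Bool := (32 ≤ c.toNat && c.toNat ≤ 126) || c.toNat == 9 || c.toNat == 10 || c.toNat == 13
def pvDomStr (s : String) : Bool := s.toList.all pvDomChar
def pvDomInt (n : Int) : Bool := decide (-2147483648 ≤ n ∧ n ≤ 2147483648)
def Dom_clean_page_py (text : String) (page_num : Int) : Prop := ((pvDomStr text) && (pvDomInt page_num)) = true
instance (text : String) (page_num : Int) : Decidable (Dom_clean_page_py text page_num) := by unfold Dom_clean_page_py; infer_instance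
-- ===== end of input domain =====

-- B re-decomposes A's single interleaved loop into a filter pass plus a current-segment merge pass (same results; objective: alternative decomposition).

-- shared tiny helper: line.endswith((".", "!", "?", ":"))
def cpEndsPunct (line : String) : Bool :=
  PySem.Str.endswith line "." || PySem.Str.endswith line "!" ||
  PySem.Str.endswith line "?" || PySem.Str.endswith line ":"

-- ===== PORT A =====
-- one fold over the raw lines; skip lines stay `continue`s, hyphen merge mutates cleaned[-1]
def cpAStep (cleaned : List String) (raw : String) : List String :=
  let line := PySem.Str.strip raw
  if PySem.Str.strIsdigit line then cleaned
  else if (PySem.Str.split₀ line).length ≤ 2 ∧ cpEndsPunct line = false then cleaned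
  else
    match cleaned.getLast? with
    | some last =>
        if PySem.Str.endswith last "-" then
          cleaned.dropLast ++ [PySem.Str.slice last none (some (-1)) ++ line]
        else cleaned ++ [line]
    | none => cleaned ++ [line]

def clean_page_py (text : String) (_page_num : Int) : String :=
  if text = "" then ""
  else
    let lines := PySem.Str.splitlines text
    let cleaned := lines.foldl cpAStep []
    PySem.Str.join "\n" cleaned

-- ===== PORT B =====
-- _keep: filter/normalise a single raw line (none = dropped)
def cpKeep (raw : String) : Option String :=
  let line := PySem.Str.strip raw
  if PySem.Str.strIsdigit line then none
  else if (PySem.Str.split₀ line).length ≤ 2 ∧ cpEndsPunct line = false then none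
  else some line

-- merge step over (out, cur): cur is the segment still being assembled
def cpBStep (acc : List String × Option String) (ln : String) : List String × Option String :=
  match acc.2 with
  | none => (acc.1, some ln)
  | some c =>
      if PySem.Str.endswith c "-" then
        (acc.1, some (PySem.Str.slice c none (some (-1)) ++ ln))
      else (acc.1 ++ [c], some ln)

def clean_page_py_alt (text : String) (_page_num : Int) : String :=
  if text = "" then ""
  else
    let kept := (PySem.Str.splitlines text).filterMap cpKeep
    let p := kept.foldl cpBStep ([], none)
    PySem.Str.join "\n" (p.1 ++ p.2.toList)

-- ===== PRECONDITION & SPEC =====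
def Spec_clean_page_py (text : String) (page_num : Int) (out : String) : Prop := out = clean_page_py_alt text page_num
instance (text : String) (page_num : Int) (out : String) : Decidable (Spec_clean_page_py text page_num out) := by unfold Spec_clean_page_py; infer_instance

-- ===== CLAIM (what is proved, stated in full; the proofs are below) =====
def Claim_equal_clean_page_py : Prop := ∀ (text : String) (page_num : Int), Dom_clean_page_py text page_num → Spec_clean_page_py text page_num (clean_page_py text page_num)

-- ===== LEMMAS AND PROOFS =====

-- A's accumulator is always B's out ++ cur (cur = none only at the very start)
lemma cp_loop (ls : List String) : ∀ (out : List String) (cur : Option String),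
    (cur = none → out = []) →
    ls.foldl cpAStep (out ++ cur.toList) =
      (let p := (ls.filterMap cpKeep).foldl cpBStep (out, cur); p.1 ++ p.2.toList) := by
  induction ls with
  | nil => intro out cur _; simp
  | cons raw rest ih =>
      intro out cur hinv
      simp only [List.foldl_cons, List.filterMap_cons]
      by_cases h1 : PySem.Chars.strIsdigit (PySem.Chars.strip raw.toList) = true
      · have hA : cpAStep (out ++ cur.toList) raw = out ++ cur.toList := by
          simp [cpAStep, h1]
        have hK : cpKeep raw = none := by simp [cpKeep, h1]
        rw [hA, hK]
        exact ih out cur hinv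
      · by_cases h2 : (PySem.Str.split₀ (PySem.Str.strip raw)).length ≤ 2 ∧
            cpEndsPunct (PySem.Str.strip raw) = false
        · have hA : cpAStep (out ++ cur.toList) raw = out ++ cur.toList := by
            simp [cpAStep, h1, h2]
          have hK : cpKeep raw = none := by simp [cpKeep, h1, h2]
          rw [hA, hK]
          exact ih out cur hinv
        · have hK : cpKeep raw = some (PySem.Str.strip raw) := by
            simp [cpKeep, h1, h2]
          rw [hK]
          simp only [List.foldl_cons]
          cases cur with
          | none =>
              have hout : out = [] := hinv rfl
              subst hout
              have hA : cpAStep ([] ++ (Option.toList (α := String) none)) raw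
                  = [] ++ (Option.toList (some (PySem.Str.strip raw))) := by
                simp [cpAStep, h1, h2]
              rw [hA]
              have hB : cpBStep ([], none) (PySem.Str.strip raw) = ([], some (PySem.Str.strip raw)) := by
                simp [cpBStep]
              rw [hB]
              exact ih [] (some (PySem.Str.strip raw)) (by simp)
          | some c =>
              by_cases h3 : PySem.Chars.endswith c.toList ['-'] = true
              · have hA : cpAStep (out ++ (Option.toList (some c))) raw
                    = out ++ (Option.toList (some (PySem.Str.slice c none (some (-1)) ++ PySem.Str.strip raw))) := by
                  simp [cpAStep, h1, h2, h3]
                have hB : cpBStep (out, some c) (PySem.Str.strip raw)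
                    = (out, some (PySem.Str.slice c none (some (-1)) ++ PySem.Str.strip raw)) := by
                  simp [cpBStep, h3]
                rw [hA, hB]
                exact ih out _ (by simp)
              · have hA : cpAStep (out ++ (Option.toList (some c))) raw
                    = (out ++ [c]) ++ (Option.toList (some (PySem.Str.strip raw))) := by
                  simp [cpAStep, h1, h2, h3]
                have hB : cpBStep (out, some c) (PySem.Str.strip raw)
                    = (out ++ [c], some (PySem.Str.strip raw)) := by
                  simp [cpBStep, h3]
                rw [hA, hB]
                exact ih (out ++ [c]) _ (by simp)

-- ===== VERDICT (by name: the statement is the Claim_ definition above) =====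
theorem clean_page_py_spec : Claim_equal_clean_page_py := by
  intro text page_num _
  unfold Spec_clean_page_py clean_page_py clean_page_py_alt
  by_cases ht : text = ""
  · simp [ht]
  · simp only [ht, if_false]
    have := cp_loop (PySem.Str.splitlines text) [] none (fun _ => rfl)
    simpa using congrArg (PySem.Str.join "\n") this
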